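-- pv_equiv track=rewrite | github.com/LakdiluA12X/FYP-IntelliScript | excel-data-extractor/file_space_cleaner.py | keep_two_consecutive_blank_lines
-- ===== SOURCE A (Python) =====
-- def keep_two_consecutive_blank_lines(lines):
--     result = []
--     consecutive_blank_lines = 0
--
--     for line in lines:
--         if line.strip() == "":
--             consecutive_blank_lines += 1
--             if consecutive_blank_lines <= 2:
--                 result.append(line)
--         else:
--             result.append(line)
--             consecutive_blank_lines = 0
--
--     return result
-- ===== SOURCE B (Python) =====
-- def keep_two_consecutive_blank_lines(lines):
--     # Run-based: split into maximal runs of blank / non-blank lines;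
--     # keep at most the first two lines of each blank run.
--     result = []
--     rest = list(lines)
--     while rest:
--         b = rest[0].strip() == ""
--         k = 0
--         while k < len(rest) and (rest[k].strip() == "") == b:
--             k += 1
--         run, rest = rest[:k], rest[k:]
--         result.extend(run[:2] if b else run)
--     return result
-- ===== Notes on version B (the rewrite author's own statement) =====
-- stated objective: alternative
-- what changed: Replaces the per-line consecutive-blank counter with a run-based decomposition: the list is split into maximal runs of blank/non-blank lines and each blank run contributes only its first two lines.
import Mathlib
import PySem

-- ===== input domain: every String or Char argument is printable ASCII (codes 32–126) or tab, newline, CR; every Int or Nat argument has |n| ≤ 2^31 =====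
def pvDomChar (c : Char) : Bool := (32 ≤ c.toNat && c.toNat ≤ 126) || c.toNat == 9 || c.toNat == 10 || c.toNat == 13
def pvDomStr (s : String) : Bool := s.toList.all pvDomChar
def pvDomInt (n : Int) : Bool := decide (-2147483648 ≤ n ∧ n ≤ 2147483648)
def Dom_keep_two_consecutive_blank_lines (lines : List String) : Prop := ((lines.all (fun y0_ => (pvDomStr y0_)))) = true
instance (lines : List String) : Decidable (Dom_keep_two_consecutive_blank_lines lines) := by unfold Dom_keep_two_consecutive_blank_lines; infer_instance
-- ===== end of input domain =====

-- B replaces A's per-line consecutive-blank counter with a run-based decomposition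
-- (maximal blank/non-blank runs; at most two lines kept per blank run): alternative, same O(n) cost.


-- ===== PORT A =====
-- A: fold over the lines carrying (result, consecutive_blank_lines).
def pvStepA (st : List String × Int) (line : String) : List String × Int :=
  if PySem.Str.strip line == "" then
    let c := st.2 + 1
    (if c ≤ 2 then st.1 ++ [line] else st.1, c)
  else
    (st.1 ++ [line], 0)

def keep_two_consecutive_blank_lines (lines : List String) : List String :=
  (lines.foldl pvStepA ([], 0)).1

-- ===== PORT B =====
def pvBlank (l : String) : Bool := PySem.Str.strip l == ""

-- B: peel off one maximal run at a time; a blank run contributes its first two lines.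
def pvRuns : List String → List String
  | [] => []
  | l :: ls =>
    let b := pvBlank l
    let run := (l :: ls).takeWhile (fun x => pvBlank x == b)
    let rest := (l :: ls).dropWhile (fun x => pvBlank x == b)
    (if b then run.take 2 else run) ++ pvRuns rest
  termination_by ls => ls.length
  decreasing_by
    simp only [List.dropWhile, beq_self_eq_true]
    calc (List.dropWhile (fun x => pvBlank x == pvBlank l) ls).length
        ≤ ls.length := List.length_dropWhile_le _ _
      _ < (l :: ls).length := by simp

def keep_two_consecutive_blank_lines_alt (lines : List String) : List String :=
  pvRuns lines

-- ===== PRECONDITION & SPEC =====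
def Spec_keep_two_consecutive_blank_lines (lines : List String) (out : List String) : Prop := out = keep_two_consecutive_blank_lines_alt lines
instance (lines : List String) (out : List String) : Decidable (Spec_keep_two_consecutive_blank_lines lines out) := by unfold Spec_keep_two_consecutive_blank_lines; infer_instance

-- ===== CLAIM (what is proved, stated in full; the proofs are below) =====
def Claim_equal_keep_two_consecutive_blank_lines : Prop := ∀ (lines : List String), Dom_keep_two_consecutive_blank_lines lines → Spec_keep_two_consecutive_blank_lines lines (keep_two_consecutive_blank_lines lines)

-- ===== LEMMAS AND PROOFS =====

-- Processing a non-blank line ignores and resets the counter.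
theorem stepA_nonblank (acc : List String) (c : Int) (l : String) (h : pvBlank l = false) :
    pvStepA (acc, c) l = (acc ++ [l], 0) := by
  simp [pvStepA, pvBlank] at *; simp [h]

-- The starting counter is irrelevant when the next line is non-blank.
theorem foldA_reset (r : String) (rs : List String) (acc : List String) (c : Int)
    (h : pvBlank r = false) :
    List.foldl pvStepA (acc, c) (r :: rs) = List.foldl pvStepA (acc, 0) (r :: rs) := by
  simp only [List.foldl_cons, stepA_nonblank acc c r h, stepA_nonblank acc 0 r h]

-- A non-blank run passes straight through.
theorem foldA_nonblank_run (run : List String) (h : ∀ x ∈ run, pvBlank x = false) :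
    ∀ (rest : List String) (acc : List String),
      List.foldl pvStepA (acc, 0) (run ++ rest) = List.foldl pvStepA (acc ++ run, 0) rest := by
  induction run with
  | nil => intro rest acc; simp
  | cons l ls ih =>
    intro rest acc
    have hl : pvBlank l = false := h l (by simp)
    simp only [List.cons_append, List.foldl_cons, stepA_nonblank acc 0 l hl]
    rw [ih (fun x hx => h x (by simp [hx])) rest (acc ++ [l])]
    simp

-- A blank run starting from counter 0 contributes its first two lines.
theorem foldA_blank_run (run : List String) (h : ∀ x ∈ run, pvBlank x = true) :
    ∀ (rest : List String) (acc : List String),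
      List.foldl pvStepA (acc, 0) (run ++ rest)
        = List.foldl pvStepA (acc ++ run.take 2, (run.length : Int)) rest := by
  suffices H : ∀ (run : List String), (∀ x ∈ run, pvBlank x = true) →
      ∀ (rest acc : List String) (c : Int), 0 ≤ c →
      List.foldl pvStepA (acc, c) (run ++ rest)
        = List.foldl pvStepA (acc ++ run.take (Int.toNat (2 - c)), c + (run.length : Int)) rest by
    intro rest acc
    simpa using H run h rest acc 0 le_rfl
  intro run
  induction run with
  | nil => intro _ rest acc c _; simp
  | cons l ls ih =>
    intro h rest acc c hc
    have hl : pvBlank l = true := h l (by simp)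
    have hstep : pvStepA (acc, c) l =
        (if c + 1 ≤ 2 then acc ++ [l] else acc, c + 1) := by
      simp [pvStepA, pvBlank] at hl ⊢; simp [hl]
    simp only [List.cons_append, List.foldl_cons, hstep]
    have hcount : c + 1 + (ls.length : Int) = c + ((ls.length : Int) + 1) := by ring
    by_cases h2 : c + 1 ≤ 2
    · simp only [if_pos h2]
      rw [ih (fun x hx => h x (by simp [hx])) rest (acc ++ [l]) (c + 1) (by omega)]
      have : Int.toNat (2 - c) = Int.toNat (2 - (c + 1)) + 1 := by omega
      simp only [this, List.take_succ_cons, List.length_cons]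
      rw [hcount]
      simp [List.append_assoc]
    · simp only [if_neg h2]
      rw [ih (fun x hx => h x (by simp [hx])) rest acc (c + 1) (by omega)]
      have e1 : Int.toNat (2 - c) = 0 := by omega
      have e2 : Int.toNat (2 - (c + 1)) = 0 := by omega
      simp only [e1, e2, List.take_zero, List.append_nil, List.length_cons]
      rw [hcount]
      push_cast; ring_nf

-- the head of a non-empty dropWhile fails the predicate
theorem head_dropWhile_false {p : String → Bool} :
    ∀ {xs : List String} {r : String} {rs : List String},
      xs.dropWhile p = r :: rs → p r = false := by
  intro xs
  induction xs with
  | nil => intro r rs h; simp [List.dropWhile] at h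
  | cons a as ih =>
    intro r rs h
    rw [List.dropWhile_cons] at h
    by_cases hp : p a
    · simp only [hp, if_true] at h; exact ih h
    · simp only [hp] at h
      cases h
      simpa using hp

-- Main invariant: the fold from counter 0 realizes the run decomposition.
theorem mainA (n : Nat) : ∀ (lines : List String), lines.length ≤ n →
    ∀ (acc : List String), (List.foldl pvStepA (acc, 0) lines).1 = acc ++ pvRuns lines := by
  induction n with
  | zero => intro lines h acc
            have : lines = [] := List.eq_nil_of_length_eq_zero (Nat.le_zero.mp h)
            simp [this, pvRuns]
  | succ n ih =>
    intro lines hlen acc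
    cases lines with
    | nil => simp [pvRuns]
    | cons l ls =>
      have hruns : pvRuns (l :: ls)
          = (if pvBlank l
              then ((l :: ls).takeWhile (fun x => pvBlank x == pvBlank l)).take 2
              else (l :: ls).takeWhile (fun x => pvBlank x == pvBlank l))
            ++ pvRuns ((l :: ls).dropWhile (fun x => pvBlank x == pvBlank l)) := by
        rw [pvRuns]
      have hsplit : (l :: ls).takeWhile (fun x => pvBlank x == pvBlank l)
          ++ (l :: ls).dropWhile (fun x => pvBlank x == pvBlank l) = l :: ls :=
        List.takeWhile_append_dropWhile
      have hrun : ∀ x ∈ (l :: ls).takeWhile (fun x => pvBlank x == pvBlank l),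
          pvBlank x = pvBlank l := by
        intro x hx
        simpa using List.mem_takeWhile_imp hx
      have hlenrest : ((l :: ls).dropWhile (fun x => pvBlank x == pvBlank l)).length ≤ n := by
        have h1 : (l :: ls).dropWhile (fun x => pvBlank x == pvBlank l)
            = ls.dropWhile (fun x => pvBlank x == pvBlank l) := by
          simp [List.dropWhile]
        have := List.length_dropWhile_le (fun x => pvBlank x == pvBlank l) ls
        simp only [h1]
        simp only [List.length_cons] at hlen
        omega
      cases hbv : pvBlank l with
      | false =>
        simp only [hbv, beq_false] at hruns hsplit hrun hlenrest
        have hall : ∀ x ∈ (l :: ls).takeWhile (fun x => !pvBlank x),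
            pvBlank x = false := hrun
        conv_lhs => rw [← hsplit]
        rw [foldA_nonblank_run _ hall, ih _ hlenrest, hruns]
        simp [List.append_assoc]
      | true =>
        simp only [hbv, beq_true] at hruns hsplit hrun hlenrest
        have hall : ∀ x ∈ (l :: ls).takeWhile (fun x => pvBlank x),
            pvBlank x = true := hrun
        conv_lhs => rw [← hsplit]
        rw [foldA_blank_run _ hall, hruns]
        cases hrest : (l :: ls).dropWhile (fun x => pvBlank x) with
        | nil => simp [pvRuns]
        | cons r rs =>
          have hrb : pvBlank r = false := head_dropWhile_false hrest
          rw [if_pos trivial, foldA_reset r rs _ _ hrb, ih (r :: rs) (hrest ▸ hlenrest)]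
          simp [List.append_assoc]

-- ===== VERDICT (by name: the statement is the Claim_ definition above) =====
theorem keep_two_consecutive_blank_lines_spec : Claim_equal_keep_two_consecutive_blank_lines := by
  intro lines _
  unfold Spec_keep_two_consecutive_blank_lines keep_two_consecutive_blank_lines keep_two_consecutive_blank_lines_alt
  simpa using mainA lines.length lines le_rfl []
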